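-- pv_equiv track=rewrite | github.com/yangxiaofu/the-owners-sim | src/game_cycle/database/schedule_rotation_api.py | _calculate_in_conference_opponent
-- ===== SOURCE A (Python) =====
-- def _calculate_in_conference_opponent(division_id: int, season: int) -> int:
--     """
--     Calculate which in-conference division to play (3-year rotation).
--
--     The NFL rotates each division through the other 3 divisions in their
--     conference over a 3-year cycle.
--
--     Args:
--         division_id: Division ID (1-8)
--         season: Season year
--
--     Returns:
--         Opponent division ID (same conference, different division)
--
--     Example:
--         AFC East (1) rotates through AFC North (2), South (3), West (4)
--         Year 0: Play AFC North (2)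
--         Year 1: Play AFC South (3)
--         Year 2: Play AFC West (4)
--         Year 3: Play AFC North (2) [cycle repeats]
--     """
--     # Determine conference divisions
--     if division_id <= 4:  # AFC
--         all_divisions = [1, 2, 3, 4]
--     else:  # NFC
--         all_divisions = [5, 6, 7, 8]
--
--     # Remove own division to get 3 possible opponents
--     other_divisions = [d for d in all_divisions if d != division_id]
--
--     # Sort to ensure consistent rotation
--     other_divisions.sort()
--
--     # Use season modulo 3 to select opponent
--     rotation_index = season % 3
--
--     return other_divisions[rotation_index]
-- ===== SOURCE B (Python) =====
-- def _calculate_in_conference_opponent(division_id: int, season: int) -> int: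
--     # Closed-form: skip own within-conference slot; no list building or sorting.
--     base = 1 if division_id <= 4 else 5
--     pos = division_id - base
--     r = season % 3
--     return base + (r + 1 if 0 <= pos <= r else r)
-- ===== Notes on version B (the rewrite author's own statement) =====
-- stated objective: simpler
-- what changed: Replaced A's list building, filtering, sorting and indexing with closed-form arithmetic: base conference offset, own within-conference slot, and a skip-mapping on season % 3.
import Mathlib
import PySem

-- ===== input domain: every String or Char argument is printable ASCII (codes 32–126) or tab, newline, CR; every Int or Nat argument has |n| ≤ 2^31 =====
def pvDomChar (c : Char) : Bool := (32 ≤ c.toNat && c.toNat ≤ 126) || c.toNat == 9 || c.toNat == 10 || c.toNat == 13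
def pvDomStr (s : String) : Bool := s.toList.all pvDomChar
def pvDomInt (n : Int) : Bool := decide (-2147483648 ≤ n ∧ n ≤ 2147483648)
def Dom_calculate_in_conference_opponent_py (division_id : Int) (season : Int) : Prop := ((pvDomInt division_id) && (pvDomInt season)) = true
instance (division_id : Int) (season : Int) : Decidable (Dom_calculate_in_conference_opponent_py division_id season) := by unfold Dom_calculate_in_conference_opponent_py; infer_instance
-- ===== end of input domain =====

-- B replaces A's list building / filtering / sorting / indexing with closed-form skip arithmetic (objective: simpler).

-- ===== PORT A =====
def calculate_in_conference_opponent_py (division_id : Int) (season : Int) : Int :=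
  let all_divisions : List Int := if division_id ≤ 4 then [1, 2, 3, 4] else [5, 6, 7, 8]
  let other_divisions : List Int := all_divisions.filter (fun d => d != division_id)
  let other_divisions : List Int := PySem.List.sorted other_divisions (fun x => x) false
  let rotation_index : Int := PySem.Int.mod season 3
  -- the index is always in range (list length ≥ 3, 0 ≤ index < 3), so the IndexError default is unreachable
  (PySem.List.pyGet? other_divisions rotation_index).getD 0

-- ===== PORT B =====
def calculate_in_conference_opponent_py_alt (division_id : Int) (season : Int) : Int :=
  let base : Int := if division_id ≤ 4 then 1 else 5
  let pos : Int := division_id - base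
  let r : Int := PySem.Int.mod season 3
  base + (if 0 ≤ pos ∧ pos ≤ r then r + 1 else r)

-- ===== PRECONDITION & SPEC =====
def Spec_calculate_in_conference_opponent_py (division_id : Int) (season : Int) (out : Int) : Prop := out = calculate_in_conference_opponent_py_alt division_id season
instance (division_id : Int) (season : Int) (out : Int) : Decidable (Spec_calculate_in_conference_opponent_py division_id season out) := by unfold Spec_calculate_in_conference_opponent_py; infer_instance

-- ===== CLAIM (what is proved, stated in full; the proofs are below) =====
def Claim_equal_calculate_in_conference_opponent_py : Prop := ∀ (division_id : Int) (season : Int), Dom_calculate_in_conference_opponent_py division_id season → Spec_calculate_in_conference_opponent_py division_id season (calculate_in_conference_opponent_py division_id season)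

-- ===== LEMMAS AND PROOFS =====

-- ===== VERDICT (by name: the statement is the Claim_ definition above) =====
theorem calculate_in_conference_opponent_py_spec : Claim_equal_calculate_in_conference_opponent_py := by
  intro d s _
  unfold Spec_calculate_in_conference_opponent_py calculate_in_conference_opponent_py calculate_in_conference_opponent_py_alt
  rw [PySem.Int.mod_eq_emod_of_pos (by norm_num : (0:Int) < 3)]
  have h3 : s % 3 = 0 ∨ s % 3 = 1 ∨ s % 3 = 2 := by omega
  have hd10 : d = 1 ∨ d = 2 ∨ d = 3 ∨ d = 4 ∨ d = 5 ∨ d = 6 ∨ d = 7 ∨ d = 8 ∨ d ≤ 0 ∨ 9 ≤ d := by omega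
  rcases h3 with h|h|h <;> rw [h] <;>
    rcases hd10 with hd|hd|hd|hd|hd|hd|hd|hd|hd|hd <;>
    first
      | (subst hd; decide)
      | (by_cases h4 : d ≤ 4
         · -- division_id ≤ 0 or contradiction: own division absent from [1,2,3,4], filter keeps all
           have hf : List.filter (fun x => x != d) ([1, 2, 3, 4] : List Int) = [1, 2, 3, 4] := by
             simp; omega
           have hs : PySem.List.sorted ([1, 2, 3, 4] : List Int) (fun x => x) false = [1, 2, 3, 4] := by decide
           simp only [if_pos h4, hf, hs, PySem.List.pyGet?, PySem.List.pyIdx?]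
           split_ifs <;> simp_all <;> omega
         · -- 9 ≤ division_id or contradiction: own division absent from [5,6,7,8], filter keeps all
           have hf : List.filter (fun x => x != d) ([5, 6, 7, 8] : List Int) = [5, 6, 7, 8] := by
             simp; omega
           have hs : PySem.List.sorted ([5, 6, 7, 8] : List Int) (fun x => x) false = [5, 6, 7, 8] := by decide
           simp only [if_neg h4, hf, hs, PySem.List.pyGet?, PySem.List.pyIdx?]
           split_ifs <;> simp_all <;> omega)
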